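-- pv_equiv track=rewrite | github.com/sysrqb/metrics-tasks | task-7009/wround.py | wround
-- ===== SOURCE A (Python) =====
-- def wround(v):
--     if v < 8:
--        return 8
--     elif v < 128:
--        downto = 1
--     elif v < 1024:
--        downto = 3
--     else:
--        downto = 7
--     v_orig = v
--     shift = 0
--     while v > downto:
--        v >>= 1
--        shift += 1
--     return v << shift
-- ===== SOURCE B (Python) =====
-- def wround(v):
--     if v < 8:
--         return 8
--     if v < 128:
--         k = 1
--     elif v < 1024:
--         k = 2
--     else:
--         k = 3
--     shift = v.bit_length() - k
--     return (v >> shift) << shift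
-- ===== Notes on version B (the rewrite author's own statement) =====
-- stated objective: simpler
-- what changed: Replaced the halving while-loop (shift counting until v <= downto) by a closed-form shift computed from v.bit_length(): keep the top k bits (k=1/2/3 per range) and mask off the rest with (v >> shift) << shift.
import Mathlib
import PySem

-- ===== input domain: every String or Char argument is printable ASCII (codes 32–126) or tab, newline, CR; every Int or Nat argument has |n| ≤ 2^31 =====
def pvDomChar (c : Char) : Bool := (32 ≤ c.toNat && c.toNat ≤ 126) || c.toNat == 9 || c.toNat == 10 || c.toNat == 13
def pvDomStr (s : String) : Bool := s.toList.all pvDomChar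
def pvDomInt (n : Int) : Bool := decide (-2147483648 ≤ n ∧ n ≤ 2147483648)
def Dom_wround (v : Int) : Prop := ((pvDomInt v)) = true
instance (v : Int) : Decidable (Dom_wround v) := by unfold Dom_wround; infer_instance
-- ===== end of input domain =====

-- B replaces A's halving while-loop by a closed-form shift from bit_length (simpler; return value only).
-- ===== PORT A =====
-- the while loop of A; the '1 ≤ downto' conjunct only makes the recursion total
-- (A always calls it with downto ∈ {1,3,7}); 'v >>= 1' is 'v >>> 1' (Python-exact per PYSEM).
def wroundLoop (v downto : Int) (shift : Nat) : Int × Nat :=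
  if h : downto < v ∧ 1 ≤ downto then
    wroundLoop (v >>> (1:Nat)) downto (shift + 1)
  else (v, shift)
termination_by v.toNat
decreasing_by
  have hv : (2 : Int) ≤ v := by omega
  have hvn : v = ((v.toNat : Nat) : Int) := (Int.toNat_of_nonneg (by omega)).symm
  rw [hvn, ← Int.natCast_shiftRight]
  simp [Nat.shiftRight_succ]
  omega

def wround (v : Int) : Int :=
  if v < 8 then 8
  else
    let downto : Int := if v < 128 then 1 else if v < 1024 then 3 else 7
    let r := wroundLoop v downto 0
    r.1 <<< r.2

-- ===== PORT B =====
def wround_alt (v : Int) : Int :=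
  if v < 8 then 8
  else
    let k : Nat := if v < 128 then 1 else if v < 1024 then 2 else 3
    let shift : Nat := PySem.Int.bitLength v - k
    (v >>> shift) <<< shift

-- ===== PRECONDITION & SPEC =====
def Spec_wround (v : Int) (out : Int) : Prop := out = wround_alt v
instance (v : Int) (out : Int) : Decidable (Spec_wround v out) := by unfold Spec_wround; infer_instance

-- ===== CLAIM (what is proved, stated in full; the proofs are below) =====
def Claim_equal_wround : Prop := ∀ (v : Int), Dom_wround v → Spec_wround v (wround v)

-- ===== LEMMAS AND PROOFS =====

lemma bitLength_gt {n k : Nat} (h : 2 ^ k ≤ n) : k < PySem.Int.bitLength (n : Int) := by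
  have h2 := PySem.Int.lt_two_pow_bitLength (n : Int)
  rw [Int.natAbs_natCast] at h2
  have : 2 ^ k < 2 ^ PySem.Int.bitLength (n : Int) := lt_of_le_of_lt h h2
  exact (Nat.pow_lt_pow_iff_right (by norm_num)).mp this

lemma bitLength_le {n k : Nat} (hn : 0 < n) (h : n < 2 ^ k) : PySem.Int.bitLength (n : Int) ≤ k := by
  have h1 := PySem.Int.two_pow_bitLength_le (n : Int) (by exact_mod_cast hn.ne')
  rw [Int.natAbs_natCast] at h1
  have : 2 ^ (PySem.Int.bitLength (n : Int) - 1) < 2 ^ k := lt_of_le_of_lt h1 h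
  have := (Nat.pow_lt_pow_iff_right (a := 2) (by norm_num)).mp this
  omega

lemma loop_spec (n : Nat) (k s : Nat) (hn : 0 < n) (hk : 0 < k) :
    wroundLoop (n : Int) ((2 ^ k : Int) - 1) s
      = (((n >>> (PySem.Int.bitLength (n : Int) - k) : Nat) : Int),
          s + (PySem.Int.bitLength (n : Int) - k)) := by
  induction n using Nat.strong_induction_on generalizing s with
  | _ n ih =>
    rw [wroundLoop.eq_def]
    by_cases hlt : n < 2 ^ k
    · have hL : PySem.Int.bitLength (n : Int) ≤ k := bitLength_le hn hlt
      rw [dif_neg (by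
        have hc : (n : Int) < (2 : Int) ^ k := by exact_mod_cast hlt
        rintro ⟨h1, h2⟩; omega)]
      simp [Nat.sub_eq_zero_of_le hL]
    · push Not at hlt
      have hg : (2 ^ k : Int) - 1 < (n : Int) ∧ (1 : Int) ≤ (2 ^ k : Int) - 1 := by
        constructor
        · have : ((2 ^ k : Nat) : Int) ≤ (n : Int) := by exact_mod_cast hlt
          push_cast at this ⊢; omega
        · have : (2 : Int) ≤ (2 ^ k : Int) := by
            calc (2 : Int) = 2 ^ 1 := by norm_num
            _ ≤ 2 ^ k := by exact pow_le_pow_right₀ (by norm_num) hk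
          omega
      rw [dif_pos hg]
      have hn2 : 2 ≤ n := le_trans (by have : 2 ^ 1 ≤ 2 ^ k := Nat.pow_le_pow_right (by norm_num) hk; simpa using this) hlt
      have hcast : ((n : Int) >>> (1 : Nat)) = ((n >>> 1 : Nat) : Int) := (Int.natCast_shiftRight n 1).symm
      have hhalf : n >>> 1 = n / 2 := by simp [Nat.shiftRight_succ]
      rw [hcast, hhalf, ih (n / 2) (by omega) (s + 1) (by omega)]
      have hLrec : PySem.Int.bitLength (n : Int) = PySem.Int.bitLength ((n / 2 : Nat) : Int) + 1 :=
        PySem.Int.bitLength_natCast hn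
      have hLk : k < PySem.Int.bitLength (n : Int) := bitLength_gt hlt
      have hsub : PySem.Int.bitLength (n : Int) - k
          = (PySem.Int.bitLength ((n / 2 : Nat) : Int) - k) + 1 := by omega
      rw [hsub, Nat.shiftRight_succ_inside]
      simp only [Prod.mk.injEq]
      exact ⟨trivial, by omega⟩

-- ===== VERDICT (by name: the statement is the Claim_ definition above) =====
theorem wround_spec : Claim_equal_wround := by
  intro v _
  unfold Spec_wround wround wround_alt
  by_cases h8 : v < 8
  · simp [h8]
  · rw [if_neg h8, if_neg h8]
    push Not at h8
    have hv : v = ((v.toNat : Nat) : Int) := (Int.toNat_of_nonneg (by omega)).symm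
    set n := v.toNat with hn
    have hn8 : 8 ≤ n := by omega
    have key : ∀ k : Nat, 0 < k →
        (wroundLoop v ((2 ^ k : Int) - 1) 0).1 <<< (wroundLoop v ((2 ^ k : Int) - 1) 0).2
          = (v >>> (PySem.Int.bitLength v - k)) <<< (PySem.Int.bitLength v - k) := by
      intro k hk
      rw [hv, loop_spec n k 0 (by omega) hk]
      simp [Int.natCast_shiftRight]
    by_cases h128 : v < 128
    · have := key 1 (by norm_num)
      simpa [h128] using this
    · by_cases h1024 : v < 1024
      · have := key 2 (by norm_num)
        norm_num at this
        simpa [h128, h1024] using this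
      · have := key 3 (by norm_num)
        norm_num at this
        simpa [h128, h1024] using this
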